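-- pv_equiv track=rewrite | github.com/Markvardsen1/DB4 | Linearization/linearization/linearize.py | find_interpolation_ranges
-- ===== SOURCE A (Python) =====
-- def find_interpolation_ranges(adc_read, i):
--     range_min = -1
--     i_min = i - 1
--     while range_min == -1:
--         if i_min < min(adc_read):
--             range_min = adc_read.index(min(adc_read))
--         elif i_min in adc_read:
--             range_min = adc_read.index(i_min)
--         else:
--             i_min -= 1
--
--     range_max = -1
--     i_max = i + 1
--     while range_max == -1:
--         if i_max > max(adc_read):
--             range_max = adc_read.index(max(adc_read))
--         elif i_max in adc_read:
--             range_max = adc_read.index(i_max)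
--         else:
--             i_max += 1
--
--     return range_min, range_max
-- ===== SOURCE B (Python) =====
-- def find_interpolation_ranges(adc_read, i):
--     # Single O(n) pass per quantity instead of A's step-by-step search:
--     # best value <= i-1 / >= i+1 (first index), falling back to min/max index.
--     def best(pred, better):
--         acc = None
--         for idx, v in enumerate(adc_read):
--             if pred(v) and (acc is None or better(v, acc[0])):
--                 acc = (v, idx)
--         return acc
--     lo = best(lambda v: v <= i - 1, lambda a, b: a > b)
--     hi = best(lambda v: v >= i + 1, lambda a, b: a < b)
--     mn = best(lambda v: True, lambda a, b: a < b)
--     mx = best(lambda v: True, lambda a, b: a > b)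
--     range_min = lo[1] if lo is not None else mn[1]
--     range_max = hi[1] if hi is not None else mx[1]
--     return range_min, range_max
-- ===== Notes on version B (the rewrite author's own statement) =====
-- stated objective: faster
-- what changed: A steps i_min/i_max one unit at a time, rescanning the list with min/max/in/index on every step (O(gap*n)); B makes linear scans that directly track the largest value <= i-1 and the smallest value >= i+1 with their first indices, falling back to the first index of min/max.
import Mathlib
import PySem

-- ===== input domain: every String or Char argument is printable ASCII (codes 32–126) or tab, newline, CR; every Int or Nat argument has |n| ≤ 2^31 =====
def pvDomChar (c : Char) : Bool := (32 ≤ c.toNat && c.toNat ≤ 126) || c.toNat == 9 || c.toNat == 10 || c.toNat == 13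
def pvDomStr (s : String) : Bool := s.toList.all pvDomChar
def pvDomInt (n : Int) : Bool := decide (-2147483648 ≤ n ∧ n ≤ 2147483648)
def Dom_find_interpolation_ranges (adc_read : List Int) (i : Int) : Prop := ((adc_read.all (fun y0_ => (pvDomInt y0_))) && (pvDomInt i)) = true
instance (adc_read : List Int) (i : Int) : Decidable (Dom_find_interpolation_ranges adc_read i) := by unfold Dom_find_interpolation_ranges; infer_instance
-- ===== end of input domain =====

-- B replaces A's unit-step search (which rescans the list each step) by direct linear scans
-- tracking the best value below/above the target with its first index: objective 'faster'.


-- ===== PORT A =====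
-- adc_read.index(v) : v is always a member where A calls it, so getD's default is never used
def pyIndex (l : List Int) (v : Int) : Int := ((PySem.List.index? l v).getD 0 : Nat)

-- A's first while loop; min(adc_read) is constant during the loop, passed as mn (needed for termination)
def loopMin (adc : List Int) (mn : Int) (t : Int) : Int :=
  if t < mn then pyIndex adc mn
  else if t ∈ adc then pyIndex adc t
  else loopMin adc mn (t - 1)
termination_by (t - mn + 1).toNat
decreasing_by omega

-- A's second while loop; max(adc_read) passed as mx
def loopMax (adc : List Int) (mx : Int) (t : Int) : Int :=
  if mx < t then pyIndex adc mx
  else if t ∈ adc then pyIndex adc t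
  else loopMax adc mx (t + 1)
termination_by (mx - t + 1).toNat
decreasing_by omega

def find_interpolation_ranges (adc_read : List Int) (i : Int) : Int × Int :=
  match PySem.List.min? adc_read (fun x => x), PySem.List.max? adc_read (fun x => x) with
  | some mn, some mx => (loopMin adc_read mn (i - 1), loopMax adc_read mx (i + 1))
  | _, _ => (0, 0)   -- unreachable: Python's min([]) raises ValueError; excluded by Pre_

-- ===== PORT B =====
-- Source B's helper 'best': one pass, keeping (value, index) of the best pred-satisfying element
-- the loop body: 'if pred(v) and (acc is None or better(v, acc[0])): acc = (v, idx)'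
def bestUpd (p : Int → Bool) (bt : Int → Int → Bool) (acc : Option (Int × Int)) (v k : Int) : Option (Int × Int) :=
  match acc with
  | none => if p v then some (v, k) else none
  | some (bv, bj) => if p v && bt v bv then some (v, k) else some (bv, bj)

def bestFold (p : Int → Bool) (bt : Int → Int → Bool) : List Int → Int → Option (Int × Int) → Option (Int × Int)
  | [], _, acc => acc
  | v :: r, k, acc => bestFold p bt r (k + 1) (bestUpd p bt acc v k)

def find_interpolation_ranges_alt (adc_read : List Int) (i : Int) : Int × Int :=
  let lo := bestFold (fun v => decide (v ≤ i - 1)) (fun a b => decide (a > b)) adc_read 0 none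
  let hi := bestFold (fun v => decide (v ≥ i + 1)) (fun a b => decide (a < b)) adc_read 0 none
  let mn := bestFold (fun _ => true) (fun a b => decide (a < b)) adc_read 0 none
  let mx := bestFold (fun _ => true) (fun a b => decide (a > b)) adc_read 0 none
  ((match lo with | some p => p.2 | none => (mn.map Prod.snd).getD 0),
   (match hi with | some p => p.2 | none => (mx.map Prod.snd).getD 0))

-- ===== PRECONDITION & SPEC =====
-- Python A raises ValueError (min of empty sequence) on []; B raises TypeError there too.
def Pre_find_interpolation_ranges (adc_read : List Int) (i : Int) : Prop := adc_read ≠ []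
instance (adc_read : List Int) (i : Int) : Decidable (Pre_find_interpolation_ranges adc_read i) := by unfold Pre_find_interpolation_ranges; infer_instance
def pvWitness_find_interpolation_ranges : List Int × Int := ([3, 1, 7, 1], 4)

def Spec_find_interpolation_ranges (adc_read : List Int) (i : Int) (out : Int × Int) : Prop := out = find_interpolation_ranges_alt adc_read i
instance (adc_read : List Int) (i : Int) (out : Int × Int) : Decidable (Spec_find_interpolation_ranges adc_read i out) := by unfold Spec_find_interpolation_ranges; infer_instance

-- ===== CLAIM (what is proved, stated in full; the proofs are below) =====
def Claim_equal_find_interpolation_ranges : Prop := ∀ (adc_read : List Int) (i : Int), Dom_find_interpolation_ranges adc_read i → Pre_find_interpolation_ranges adc_read i → Spec_find_interpolation_ranges adc_read i (find_interpolation_ranges adc_read i)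

-- ===== LEMMAS AND PROOFS =====

theorem bestFold_all_false (p : Int → Bool) (bt : Int → Int → Bool) (l : List Int) :
    ∀ (k : Int) (acc : Option (Int × Int)), (∀ v ∈ l, p v = false) →
      bestFold p bt l k acc = acc := by
  induction l with
  | nil => intro k acc _; rfl
  | cons v r ih =>
      intro k acc h
      have hupd : bestUpd p bt acc v k = acc := by
        cases acc with
        | none => simp [bestUpd, h v (by simp)]
        | some q => simp [bestUpd, h v (by simp)]
      simp only [bestFold, hupd]
      exact ih _ _ (fun u hu => h u (by simp [hu]))

theorem bestFold_congr (p q : Int → Bool) (bt : Int → Int → Bool) (l : List Int)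
    (h : ∀ v ∈ l, p v = q v) :
    ∀ (k : Int) (acc : Option (Int × Int)),
      bestFold p bt l k acc = bestFold q bt l k acc := by
  induction l with
  | nil => intro k acc; rfl
  | cons v r ih =>
      intro k acc
      have hupd : bestUpd p bt acc v k = bestUpd q bt acc v k := by
        cases acc with
        | none => simp [bestUpd, h v (by simp)]
        | some w => simp [bestUpd, h v (by simp)]
      simp only [bestFold, hupd]
      exact ih (fun u hu => h u (by simp [hu])) _ _

theorem lo_stuck (t : Int) (l : List Int) :
    ∀ (k j : Int),
      bestFold (fun v => decide (v ≤ t)) (fun a b => decide (a > b)) l k (some (t, j)) = some (t, j) := by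
  induction l with
  | nil => intro k j; rfl
  | cons v r ih =>
      intro k j
      have hc : (decide (v ≤ t) && decide (v > t)) = false := by
        by_cases h : v ≤ t
        · simp [h]
        · simp [h]
      simp [bestFold, bestUpd, hc, ih]

theorem hi_stuck (t : Int) (l : List Int) :
    ∀ (k j : Int),
      bestFold (fun v => decide (v ≥ t)) (fun a b => decide (a < b)) l k (some (t, j)) = some (t, j) := by
  induction l with
  | nil => intro k j; rfl
  | cons v r ih =>
      intro k j
      have hc : (decide (v ≥ t) && decide (v < t)) = false := by
        by_cases h : v ≥ t
        · simp [h]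
        · simp [h]
      simp [bestFold, bestUpd, hc, ih]

theorem lo_present (t : Int) (l : List Int) :
    ∀ (k : Int) (acc : Option (Int × Int)), t ∈ l →
      (∀ av aj : Int, acc = some (av, aj) → av < t) →
      bestFold (fun v => decide (v ≤ t)) (fun a b => decide (a > b)) l k acc
        = some (t, k + (l.idxOf t : Int)) := by
  induction l with
  | nil => intro _ _ h _; simp at h
  | cons v r ih =>
      intro k acc hmem hacc
      by_cases hv : v = t
      · subst hv
        have hupd : bestUpd (fun u => decide (u ≤ v)) (fun a b => decide (a > b)) acc v k
            = some (v, k) := by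
          cases acc with
          | none => simp [bestUpd]
          | some p =>
              have := hacc p.1 p.2 (by rfl)
              simp [bestUpd, this]
        simp only [bestFold, hupd]
        rw [lo_stuck]
        simp [List.idxOf_cons_self]
      · have hmr : t ∈ r := by
          rcases List.mem_cons.mp hmem with h | h
          · exact absurd h.symm hv
          · exact h
        simp only [bestFold]
        rw [ih (k + 1) _ hmr ?_]
        · have : (v :: r).idxOf t = r.idxOf t + 1 := by
            simp [hv]
          rw [this]; push_cast; ring_nf
        · intro av aj h
          cases acc with
          | none =>
              simp only [bestUpd] at h
              split at h
              · cases h; rename_i hcond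
                have hle : v ≤ t := by simpa using hcond
                omega
              · cases h
          | some p =>
              simp only [bestUpd] at h
              split at h
              · cases h; rename_i hcond
                have hle : v ≤ t := by
                  rcases Bool.and_eq_true_iff.mp hcond with ⟨h1, _⟩
                  simpa using h1
                omega
              · cases h
                exact hacc p.1 p.2 (by rfl)

theorem hi_present (t : Int) (l : List Int) :
    ∀ (k : Int) (acc : Option (Int × Int)), t ∈ l →
      (∀ av aj : Int, acc = some (av, aj) → t < av) →
      bestFold (fun v => decide (v ≥ t)) (fun a b => decide (a < b)) l k acc
        = some (t, k + (l.idxOf t : Int)) := by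
  induction l with
  | nil => intro _ _ h _; simp at h
  | cons v r ih =>
      intro k acc hmem hacc
      by_cases hv : v = t
      · subst hv
        have hupd : bestUpd (fun u => decide (u ≥ v)) (fun a b => decide (a < b)) acc v k
            = some (v, k) := by
          cases acc with
          | none => simp [bestUpd]
          | some p =>
              have := hacc p.1 p.2 (by rfl)
              simp [bestUpd, this]
        simp only [bestFold, hupd]
        rw [hi_stuck]
        simp [List.idxOf_cons_self]
      · have hmr : t ∈ r := by
          rcases List.mem_cons.mp hmem with h | h
          · exact absurd h.symm hv
          · exact h
        simp only [bestFold]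
        rw [ih (k + 1) _ hmr ?_]
        · have : (v :: r).idxOf t = r.idxOf t + 1 := by
            simp [hv]
          rw [this]; push_cast; ring_nf
        · intro av aj h
          cases acc with
          | none =>
              simp only [bestUpd] at h
              split at h
              · cases h; rename_i hcond
                have hge : v ≥ t := by simpa using hcond
                omega
              · cases h
          | some p =>
              simp only [bestUpd] at h
              split at h
              · cases h; rename_i hcond
                have hge : v ≥ t := by
                  rcases Bool.and_eq_true_iff.mp hcond with ⟨h1, _⟩
                  simpa using h1
                omega
              · cases h
                exact hacc p.1 p.2 (by rfl)

theorem idxOf?_of_mem (l : List Int) (v : Int) (h : v ∈ l) : l.idxOf? v = some (l.idxOf v) := by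
  induction l with
  | nil => simp at h
  | cons x r ih =>
      by_cases hx : x = v
      · subst hx; simp [List.idxOf?_cons]
      · have hm : v ∈ r := by
          rcases List.mem_cons.mp h with h' | h'
          · exact absurd h'.symm hx
          · exact h'
        simp [List.idxOf?_cons, hx, ih hm]

theorem pyIndex_eq (l : List Int) (v : Int) (h : v ∈ l) : pyIndex l v = (l.idxOf v : Int) := by
  simp [pyIndex, PySem.List.index?_eq_idxOf?, idxOf?_of_mem l v h]

-- the result of A's first loop, written with B's lo-scan
def altLo (adc : List Int) (mn t : Int) : Int :=
  match bestFold (fun v => decide (v ≤ t)) (fun a b => decide (a > b)) adc 0 none with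
  | some p => p.2
  | none => pyIndex adc mn

def altHi (adc : List Int) (mx t : Int) : Int :=
  match bestFold (fun v => decide (v ≥ t)) (fun a b => decide (a < b)) adc 0 none with
  | some p => p.2
  | none => pyIndex adc mx

theorem loopMin_eq (adc : List Int) (mn : Int) (hmn : ∀ v ∈ adc, mn ≤ v) :
    ∀ t : Int, loopMin adc mn t = altLo adc mn t := by
  intro t
  induction t using loopMin.induct adc mn with
  | case1 t h =>
      rw [loopMin, if_pos h]
      unfold altLo
      rw [bestFold_all_false]
      intro v hv
      have := hmn v hv
      simp; omega
  | case2 t h1 h2 =>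
      rw [loopMin, if_neg h1, if_pos h2]
      unfold altLo
      rw [lo_present t adc 0 none h2 (by intro _ _ h; cases h)]
      simp [pyIndex_eq adc t h2]
  | case3 t h1 h2 ih =>
      rw [loopMin, if_neg h1, if_neg h2, ih]
      unfold altLo
      rw [bestFold_congr (fun v => decide (v ≤ t)) (fun v => decide (v ≤ t - 1))]
      intro v hv
      have : v ≠ t := fun hvt => h2 (hvt ▸ hv)
      simp; omega

theorem loopMax_eq (adc : List Int) (mx : Int) (hmx : ∀ v ∈ adc, v ≤ mx) :
    ∀ t : Int, loopMax adc mx t = altHi adc mx t := by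
  intro t
  induction t using loopMax.induct adc mx with
  | case1 t h =>
      rw [loopMax, if_pos h]
      unfold altHi
      rw [bestFold_all_false]
      intro v hv
      have := hmx v hv
      simp; omega
  | case2 t h1 h2 =>
      rw [loopMax, if_neg h1, if_pos h2]
      unfold altHi
      rw [hi_present t adc 0 none h2 (by intro _ _ h; cases h)]
      simp [pyIndex_eq adc t h2]
  | case3 t h1 h2 ih =>
      rw [loopMax, if_neg h1, if_neg h2, ih]
      unfold altHi
      rw [bestFold_congr (fun v => decide (v ≥ t)) (fun v => decide (v ≥ t + 1))]
      intro v hv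
      have : v ≠ t := fun hvt => h2 (hvt ▸ hv)
      simp; omega

-- ===== VERDICT (by name: the statement is the Claim_ definition above) =====
theorem find_interpolation_ranges_spec : Claim_equal_find_interpolation_ranges := by
  intro adc i _ hpre
  unfold Spec_find_interpolation_ranges
  obtain ⟨mn, hmn⟩ : ∃ mn, PySem.List.min? adc (fun x => x) = some mn := by
    cases h : PySem.List.min? adc (fun x => x) with
    | none => exact absurd ((PySem.List.min?_eq_none_iff _ _).mp h) hpre
    | some m => exact ⟨m, rfl⟩
  obtain ⟨mx, hmx⟩ : ∃ mx, PySem.List.max? adc (fun x => x) = some mx := by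
    cases h : PySem.List.max? adc (fun x => x) with
    | none => exact absurd ((PySem.List.max?_eq_none_iff _ _).mp h) hpre
    | some m => exact ⟨m, rfl⟩
  have hmnmem : mn ∈ adc := PySem.List.min?_mem hmn
  have hmxmem : mx ∈ adc := PySem.List.max?_mem hmx
  have hmnle : ∀ v ∈ adc, mn ≤ v := fun v hv => PySem.List.min?_isMin hmn v hv
  have hmxge : ∀ v ∈ adc, v ≤ mx := fun v hv => PySem.List.max?_isMax hmx v hv
  unfold find_interpolation_ranges
  rw [hmn, hmx]
  show (loopMin adc mn (i - 1), loopMax adc mx (i + 1)) = find_interpolation_ranges_alt adc i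
  rw [loopMin_eq adc mn hmnle, loopMax_eq adc mx hmxge]
  unfold find_interpolation_ranges_alt altLo altHi
  have hmnF : bestFold (fun _ => true) (fun a b => decide (a < b)) adc 0 none
      = some (mn, (adc.idxOf mn : Int)) := by
    rw [bestFold_congr (fun _ => true) (fun v => decide (mn ≤ v)) _ adc
        (by intro v hv; simp [hmnle v hv])]
    have := hi_present mn adc 0 none hmnmem (by intro _ _ h; cases h)
    simpa using this
  have hmxF : bestFold (fun _ => true) (fun a b => decide (a > b)) adc 0 none
      = some (mx, (adc.idxOf mx : Int)) := by
    rw [bestFold_congr (fun _ => true) (fun v => decide (v ≤ mx)) _ adc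
        (by intro v hv; simp [hmxge v hv])]
    have := lo_present mx adc 0 none hmxmem (by intro _ _ h; cases h)
    simpa using this
  rw [hmnF, hmxF]
  cases hlo : bestFold (fun v => decide (v ≤ i - 1)) (fun a b => decide (a > b)) adc 0 none with
  | none =>
      cases hhi : bestFold (fun v => decide (v ≥ i + 1)) (fun a b => decide (a < b)) adc 0 none with
      | none => simp [pyIndex_eq adc mn hmnmem, pyIndex_eq adc mx hmxmem]
      | some p => simp [pyIndex_eq adc mn hmnmem]
  | some p =>
      cases hhi : bestFold (fun v => decide (v ≥ i + 1)) (fun a b => decide (a < b)) adc 0 none with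
      | none => simp [pyIndex_eq adc mx hmxmem]
      | some q => simp
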